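-- pv_equiv track=rewrite | github.com/balgot/aiml-fetch | download-botlibre.py | _iter_url_rec
-- ===== SOURCE A (Python) =====
-- options = {
--    "instance-filter": ["public"],
--    "category-filter": ["AIML"],
--    "content-rating": ["Teen", "Mature"],
--    "page": list(map(str, range(5)))
-- }
--
-- def _iter_url_rec(keys: list, path: list):
--     if not keys:
--         yield "&".join(path)
--         return
--     key = keys.pop()
--     for value in options[key]:
--         option = f"{key}={value}"
--         path.append(option)
--         yield from _iter_url_rec(keys, path)
--         path.pop()
--     keys.append(key)
-- ===== SOURCE B (Python) =====
-- options = {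
--    "instance-filter": ["public"],
--    "category-filter": ["AIML"],
--    "content-rating": ["Teen", "Mature"],
--    "page": list(map(str, range(5)))
-- }
--
-- def _iter_url_rec(keys: list, path: list):
--     # Iterative Cartesian product, built bottom-up; does not mutate keys/path.
--     rev = keys[::-1]
--     combos = [list(path)]
--     for k in rev:
--         combos = [c + [f"{k}={v}"] for c in combos for v in options[k]]
--     for c in combos:
--         yield "&".join(c)
-- ===== Notes on version B (the rewrite author's own statement) =====
-- stated objective: idiomatic
-- what changed: Replaces the mutating recursive backtracking generator with an iterative bottom-up Cartesian-product build over the reversed key list, leaving keys/path unmutated.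
-- outside the precondition, e.g. on _iter_url_rec(['nope'], []): A raises KeyError, B raises KeyError
import Mathlib
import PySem

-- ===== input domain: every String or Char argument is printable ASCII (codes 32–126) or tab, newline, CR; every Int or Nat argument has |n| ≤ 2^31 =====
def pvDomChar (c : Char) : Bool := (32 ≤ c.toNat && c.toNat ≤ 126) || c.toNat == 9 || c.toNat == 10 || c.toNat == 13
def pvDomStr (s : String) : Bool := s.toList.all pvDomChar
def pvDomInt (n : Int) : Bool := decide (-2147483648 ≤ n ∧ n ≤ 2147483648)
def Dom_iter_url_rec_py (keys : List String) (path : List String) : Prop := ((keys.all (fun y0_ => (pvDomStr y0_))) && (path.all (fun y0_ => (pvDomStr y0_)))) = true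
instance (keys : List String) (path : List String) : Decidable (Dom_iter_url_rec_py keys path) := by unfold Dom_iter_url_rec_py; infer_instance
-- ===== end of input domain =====

-- B replaces the recursive backtracking generator by an iterative bottom-up product build;
-- return value only: A temporarily mutates (and restores) keys/path, B never mutates them.

-- the module-level `options` dict (fixed literal); unknown keys raise KeyError in Python (excluded by Pre_)
def pvOptions (k : String) : List String :=
  if k = "instance-filter" then ["public"]
  else if k = "category-filter" then ["AIML"]
  else if k = "content-rating" then ["Teen", "Mature"]
  else if k = "page" then ["0", "1", "2", "3", "4"]
  else []

-- ===== PORT A =====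
-- A pops keys from the END and recurses; popping repeatedly from the end = structural
-- recursion over the reversed list, appending "key=value" to path and yielding the join at the base.
def pvIterA : List String → List String → List String
  | [], path => [PySem.Str.join "&" path]
  | key :: rest, path =>
      (pvOptions key).flatMap (fun value => pvIterA rest (path ++ [key ++ "=" ++ value]))

def iter_url_rec_py (keys : List String) (path : List String) : List String :=
  pvIterA keys.reverse path

-- ===== PORT B =====
def pvStep (cs : List (List String)) (k : String) : List (List String) :=
  cs.flatMap (fun c => (pvOptions k).map (fun v => c ++ [k ++ "=" ++ v]))

def iter_url_rec_py_alt (keys : List String) (path : List String) : List String :=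
  let rev := keys.reverse
  let combos := rev.foldl pvStep [path]
  combos.map (fun c => PySem.Str.join "&" c)

-- ===== PRECONDITION & SPEC =====
-- Pre_ excludes exactly the inputs where Python A raises KeyError: a key outside the options dict.
def Pre_iter_url_rec_py (keys : List String) (path : List String) : Prop :=
  (keys.all (fun k => ["instance-filter", "category-filter", "content-rating", "page"].contains k)) = true
instance (keys : List String) (path : List String) : Decidable (Pre_iter_url_rec_py keys path) := by unfold Pre_iter_url_rec_py; infer_instance

def pvWitness_iter_url_rec_py : List String × List String :=
  (["content-rating", "page"], ["instance-filter=public"])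

def Spec_iter_url_rec_py (keys : List String) (path : List String) (out : List String) : Prop := out = iter_url_rec_py_alt keys path
instance (keys : List String) (path : List String) (out : List String) : Decidable (Spec_iter_url_rec_py keys path out) := by unfold Spec_iter_url_rec_py; infer_instance

-- ===== CLAIM (what is proved, stated in full; the proofs are below) =====
def Claim_equal_iter_url_rec_py : Prop := ∀ (keys : List String) (path : List String), Dom_iter_url_rec_py keys path → Pre_iter_url_rec_py keys path → Spec_iter_url_rec_py keys path (iter_url_rec_py keys path)

-- ===== LEMMAS AND PROOFS =====

-- foldl of pvStep distributes over the accumulator list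
theorem pvStep_foldl_flatMap (l : List String) (cs : List (List String)) :
    l.foldl pvStep cs = cs.flatMap (fun c => l.foldl pvStep [c]) := by
  induction l generalizing cs with
  | nil => simp
  | cons k rest ih =>
      simp only [List.foldl_cons]
      rw [ih (pvStep cs k),
        show (fun c => rest.foldl pvStep (pvStep [c] k))
            = fun c => (pvStep [c] k).flatMap (fun c' => rest.foldl pvStep [c'])
          from funext fun c => ih _]
      simp [pvStep, List.flatMap_assoc, List.flatMap_map]

-- main invariant: A's recursion equals B's bottom-up product, mapped through join
theorem pvIterA_eq (l : List String) (path : List String) :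
    pvIterA l path = (l.foldl pvStep [path]).map (fun c => PySem.Str.join "&" c) := by
  induction l generalizing path with
  | nil => simp [pvIterA]
  | cons k rest ih =>
      simp only [pvIterA, List.foldl_cons]
      rw [pvStep_foldl_flatMap rest (pvStep [path] k)]
      simp [pvStep, ih, List.flatMap_map, List.map_flatMap]

-- ===== VERDICT (by name: the statement is the Claim_ definition above) =====
theorem iter_url_rec_py_spec : Claim_equal_iter_url_rec_py := by
  intro keys path _ _
  unfold Spec_iter_url_rec_py iter_url_rec_py iter_url_rec_py_alt
  exact pvIterA_eq keys.reverse path
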